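-- pv_equiv track=rewrite | github.com/Neo-101-zz/R2S | swfusion/utils.py | less_obey_more
-- ===== SOURCE A (Python) =====
-- def less_obey_more(pred, clf_num, pred_length, res):
--     for i in range(pred_length):
--         high_num = 0
--         low_num = 0
--         for j in range(clf_num):
--             if pred[j][i] > 0:
--                 high_num += 1
--             elif pred[j][i] < 0:
--                 low_num += 1
--         if high_num > low_num:
--             res[i] = True
--         else:
--             res[i] = False
--
--     return res
-- ===== SOURCE B (Python) =====
-- def less_obey_more(pred, clf_num, pred_length, res):
--     n = max(pred_length, 0)
--     if n == 0:
--         return res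
--     score = [0] * n
--     for j in range(clf_num):
--         row = pred[j]
--         for i in range(n):
--             v = row[i]
--             if v > 0:
--                 score[i] += 1
--             elif v < 0:
--                 score[i] -= 1
--     for i in range(n):
--         res[i] = score[i] > 0
--     return res
-- ===== Notes on version B (the rewrite author's own statement) =====
-- stated objective: alternative
-- what changed: Transposed the loop nest: classifiers become the outer loop accumulating a per-index signed score array, followed by a separate finalize pass setting res[i] = score[i] > 0, instead of recomputing high/low counters per index.
import Mathlib
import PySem

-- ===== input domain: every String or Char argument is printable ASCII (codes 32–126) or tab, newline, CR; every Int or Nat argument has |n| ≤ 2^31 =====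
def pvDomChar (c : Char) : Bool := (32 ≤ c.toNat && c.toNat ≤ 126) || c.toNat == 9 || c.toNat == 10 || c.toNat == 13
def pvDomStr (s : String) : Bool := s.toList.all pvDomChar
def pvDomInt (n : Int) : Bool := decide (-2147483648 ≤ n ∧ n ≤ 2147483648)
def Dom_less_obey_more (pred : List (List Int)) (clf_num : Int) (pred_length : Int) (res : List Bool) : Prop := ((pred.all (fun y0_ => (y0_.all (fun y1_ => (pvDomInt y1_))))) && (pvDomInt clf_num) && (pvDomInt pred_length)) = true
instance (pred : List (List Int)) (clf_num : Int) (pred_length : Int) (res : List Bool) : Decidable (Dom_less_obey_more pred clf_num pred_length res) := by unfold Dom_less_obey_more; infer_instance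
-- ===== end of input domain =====

-- B transposes A's loop nest: classifiers outer, accumulating a per-index signed score list, then a
-- separate finalize pass; equal return value proved on Pre_ (in Python both also mutate `res` identically).


-- ===== PORT A =====
def less_obey_more (pred : List (List Int)) (clf_num : Int) (pred_length : Int) (res : List Bool) : List Bool :=
  (PySem.List.pyRange 0 pred_length 1).foldl (fun res i =>
    let hl : Int × Int :=
      (PySem.List.pyRange 0 clf_num 1).foldl (fun hl j =>
        if PySem.List.pyGetD (PySem.List.pyGetD pred j []) i 0 > 0 then (hl.1 + 1, hl.2)
        else if PySem.List.pyGetD (PySem.List.pyGetD pred j []) i 0 < 0 then (hl.1, hl.2 + 1)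
        else hl) (0, 0)
    PySem.List.pySetD res i (decide (hl.1 > hl.2))) res

-- ===== PORT B =====
def less_obey_more_alt (pred : List (List Int)) (clf_num : Int) (pred_length : Int) (res : List Bool) : List Bool :=
  let n : Int := max pred_length 0
  if n = 0 then res
  else
    let score : List Int :=
      (PySem.List.pyRange 0 clf_num 1).foldl (fun score j =>
        let row := PySem.List.pyGetD pred j []
        (PySem.List.pyRange 0 n 1).foldl (fun score i =>
          let v := PySem.List.pyGetD row i 0
          if v > 0 then PySem.List.pySetD score i (PySem.List.pyGetD score i 0 + 1)
          else if v < 0 then PySem.List.pySetD score i (PySem.List.pyGetD score i 0 - 1)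
          else score) score) (List.replicate n.toNat 0)
    (PySem.List.pyRange 0 n 1).foldl (fun res i =>
      PySem.List.pySetD res i (decide (PySem.List.pyGetD score i 0 > 0))) res

-- ===== PRECONDITION & SPEC =====
-- Pre_ = exactly the inputs where Python A returns: A raises IndexError iff pred_length > 0 and
-- (clf_num exceeds the number of rows, some row j < clf_num is shorter than pred_length, or res is).
def Pre_less_obey_more (pred : List (List Int)) (clf_num : Int) (pred_length : Int) (res : List Bool) : Prop :=
  pred_length ≤ 0 ∨
    (pred_length ≤ (res.length : Int) ∧ clf_num ≤ (pred.length : Int) ∧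
      ∀ row ∈ pred.take clf_num.toNat, pred_length ≤ (row.length : Int))
instance (pred : List (List Int)) (clf_num : Int) (pred_length : Int) (res : List Bool) : Decidable (Pre_less_obey_more pred clf_num pred_length res) := by unfold Pre_less_obey_more; infer_instance

def pvWitness_less_obey_more : List (List Int) × Int × Int × List Bool :=
  ([[1, -1], [2, 0], [-3, 1]], 3, 2, [false, false])

def Spec_less_obey_more (pred : List (List Int)) (clf_num : Int) (pred_length : Int) (res : List Bool) (out : List Bool) : Prop := out = less_obey_more_alt pred clf_num pred_length res
instance (pred : List (List Int)) (clf_num : Int) (pred_length : Int) (res : List Bool) (out : List Bool) : Decidable (Spec_less_obey_more pred clf_num pred_length res out) := by unfold Spec_less_obey_more; infer_instance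

-- ===== CLAIM (what is proved, stated in full; the proofs are below) =====
def Claim_equal_less_obey_more : Prop := ∀ (pred : List (List Int)) (clf_num : Int) (pred_length : Int) (res : List Bool), Dom_less_obey_more pred clf_num pred_length res → Pre_less_obey_more pred clf_num pred_length res → Spec_less_obey_more pred clf_num pred_length res (less_obey_more pred clf_num pred_length res)

-- ===== LEMMAS AND PROOFS =====

def pvSgn (x : Int) : Int := if x > 0 then 1 else if x < 0 then -1 else 0

-- abstract inner-loop step of B (v is the per-classifier column lookup)
def pvStep (v : Int → Int) (s : List Int) (i : Int) : List Int :=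
  if v i > 0 then PySem.List.pySetD s i (PySem.List.pyGetD s i 0 + 1)
  else if v i < 0 then PySem.List.pySetD s i (PySem.List.pyGetD s i 0 - 1)
  else s

lemma pvSetConstPoint {α : Type} (r : List α) (i : Int) (hi : 0 ≤ i) (b : α) (k : Nat) :
    (PySem.List.pySetD r i b)[k]? = if (k : Int) = i then r[k]?.map (fun _ => b) else r[k]? := by
  have hik : (i.toNat = k) ↔ ((k : Int) = i) := by omega
  rw [PySem.List.pySetD_of_nonneg _ _ hi, List.getElem?_set]
  by_cases he : (k : Int) = i
  · have he' : i.toNat = k := hik.mpr he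
    by_cases hk : k < r.length
    · simp [he, he', hk, List.getElem?_eq_getElem hk]
    · simp [he, he', hk]
  · have he' : ¬ i.toNat = k := fun h => he (hik.mp h)
    simp [he, he']

lemma pvSetPoint (s : List Int) (i : Int) (hi : 0 ≤ i) (c : Int) (k : Nat) :
    (PySem.List.pySetD s i (PySem.List.pyGetD s i 0 + c))[k]? =
      if (k : Int) = i then s[k]?.map (· + c) else s[k]? := by
  have hik : (i.toNat = k) ↔ ((k : Int) = i) := by omega
  rw [PySem.List.pySetD_of_nonneg _ _ hi, PySem.List.pyGetD_of_nonneg _ _ hi,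
    List.getElem?_set]
  by_cases he : (k : Int) = i
  · have he' : i.toNat = k := hik.mpr he
    by_cases hk : k < s.length
    · simp [he, he', hk, List.getD_eq_getElem?_getD, List.getElem?_eq_getElem hk]
    · simp [he, he', hk]
  · have he' : ¬ i.toNat = k := fun h => he (hik.mp h)
    simp [he, he']

lemma pvStepPoint (v : Int → Int) (s : List Int) (i : Int) (hi : 0 ≤ i) (k : Nat) :
    (pvStep v s i)[k]? = if (k : Int) = i then s[k]?.map (· + pvSgn (v i)) else s[k]? := by
  by_cases h1 : v i > 0
  · rw [show pvStep v s i = PySem.List.pySetD s i (PySem.List.pyGetD s i 0 + 1) from by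
      simp [pvStep, h1], pvSetPoint s i hi 1 k]
    simp [pvSgn, h1]
  · by_cases h2 : v i < 0
    · rw [show pvStep v s i = PySem.List.pySetD s i (PySem.List.pyGetD s i 0 + (-1)) from by
        simp [pvStep, h1, h2, sub_eq_add_neg], pvSetPoint s i hi (-1) k]
      simp [pvSgn, h1, h2]
    · rw [show pvStep v s i = s from by simp [pvStep, h1, h2]]
      have h0 : pvSgn (v i) = 0 := by simp [pvSgn, h1, h2]
      rw [h0]
      cases he : s[k]? <;> simp

lemma pvInner (v : Int → Int) (m : Nat) (s : List Int) (k : Nat) :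
    (((List.range m).map Int.ofNat).foldl (pvStep v) s)[k]? =
      if k < m then s[k]?.map (· + pvSgn (v k)) else s[k]? := by
  induction m with
  | zero => simp
  | succ m ih =>
    rw [List.range_succ, List.map_append, List.foldl_append]
    simp only [List.map_cons, List.map_nil, List.foldl_cons, List.foldl_nil]
    simp only [Int.ofNat_eq_natCast]
    rw [pvStepPoint v _ _ (Int.natCast_nonneg m) k]
    simp only [Int.ofNat_eq_natCast] at ih
    rw [ih]
    simp only [Nat.cast_inj]
    by_cases he : k = m
    · subst he
      simp
    · by_cases hk : k < m
      · simp [he, hk, Nat.lt_succ_of_lt hk]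
      · have h3 : ¬ k < m + 1 := by omega
        simp [he, hk, h3]

lemma pvAssign {α : Type} (h : Int → α) (m : Nat) (r : List α) (k : Nat) :
    (((List.range m).map Int.ofNat).foldl (fun r i => PySem.List.pySetD r i (h i)) r)[k]? =
      if k < m then r[k]?.map (fun _ => h k) else r[k]? := by
  induction m with
  | zero => simp
  | succ m ih =>
    rw [List.range_succ, List.map_append, List.foldl_append]
    simp only [List.map_cons, List.map_nil, List.foldl_cons, List.foldl_nil]
    simp only [Int.ofNat_eq_natCast]
    rw [pvSetConstPoint _ _ (Int.natCast_nonneg m) _ k]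
    simp only [Int.ofNat_eq_natCast] at ih
    rw [ih]
    simp only [Nat.cast_inj]
    by_cases he : k = m
    · subst he
      simp
    · by_cases hk : k < m
      · simp [he, hk, Nat.lt_succ_of_lt hk]
      · have h3 : ¬ k < m + 1 := by omega
        simp [he, hk, h3]

lemma pvOuter (v : Int → Int → Int) (l : List Int) (m : Nat) (s : List Int) (k : Nat) (hk : k < m) :
    (l.foldl (fun s j => ((List.range m).map Int.ofNat).foldl (pvStep (v j)) s) s)[k]? =
      s[k]?.map (· + (l.map (fun j => pvSgn (v j k))).sum) := by
  induction l generalizing s with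
  | nil => cases he : s[k]? <;> simp [he]
  | cons j t ih =>
    simp only [List.foldl_cons, List.map_cons, List.sum_cons]
    rw [ih, pvInner, if_pos hk]
    cases he : s[k]? <;> simp [he, add_assoc]

lemma pvPair (w : Int → Int) (l : List Int) (p : Int × Int) :
    (l.foldl (fun p j =>
        if w j > 0 then (p.1 + 1, p.2)
        else if w j < 0 then (p.1, p.2 + 1)
        else p) p).1 -
    (l.foldl (fun p j =>
        if w j > 0 then (p.1 + 1, p.2)
        else if w j < 0 then (p.1, p.2 + 1)
        else p) p).2 = p.1 - p.2 + (l.map (fun j => pvSgn (w j))).sum := by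
  induction l generalizing p with
  | nil => simp
  | cons j t ih =>
    simp only [List.foldl_cons, List.map_cons, List.sum_cons]
    rw [ih]
    unfold pvSgn
    split_ifs with h1 h2 <;> simp <;> ring

lemma pvRange0 (L : Int) :
    PySem.List.pyRange 0 L 1 = (List.range L.toNat).map Int.ofNat := by
  rw [PySem.List.pyRange_one]
  simp only [Int.sub_zero]
  exact List.map_congr_left (fun a _ => zero_add (Int.ofNat a))

def pvV (pred : List (List Int)) (j i : Int) : Int :=
  PySem.List.pyGetD (PySem.List.pyGetD pred j []) i 0

def pvPairF (pred : List (List Int)) (c i : Int) : Int × Int :=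
  (PySem.List.pyRange 0 c 1).foldl (fun hl j =>
    if pvV pred j i > 0 then (hl.1 + 1, hl.2)
    else if pvV pred j i < 0 then (hl.1, hl.2 + 1)
    else hl) (0, 0)

def pvScore (pred : List (List Int)) (c L : Int) : List Int :=
  (PySem.List.pyRange 0 c 1).foldl (fun s j =>
    (PySem.List.pyRange 0 (max L 0) 1).foldl (pvStep (pvV pred j)) s)
    (List.replicate (max L 0).toNat 0)

lemma pvAeq (pred : List (List Int)) (c L : Int) (res : List Bool) :
    less_obey_more pred c L res =
      (PySem.List.pyRange 0 L 1).foldl (fun r i =>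
        PySem.List.pySetD r i (decide ((pvPairF pred c i).1 > (pvPairF pred c i).2))) res := rfl

lemma pvBeq (pred : List (List Int)) (c L : Int) (res : List Bool) :
    less_obey_more_alt pred c L res =
      if max L 0 = 0 then res
      else (PySem.List.pyRange 0 (max L 0) 1).foldl (fun r i =>
        PySem.List.pySetD r i (decide (PySem.List.pyGetD (pvScore pred c L) i 0 > 0))) res := rfl

lemma pvMain (pred : List (List Int)) (c L : Int) (res : List Bool) :
    less_obey_more pred c L res = less_obey_more_alt pred c L res := by
  by_cases h0 : max L 0 = 0
  · rw [pvAeq, pvBeq, if_pos h0, pvRange0 L, show L.toNat = 0 by omega]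
    simp
  rw [pvAeq, pvBeq, if_neg h0, pvRange0 L, pvRange0 (max L 0),
    show (max L 0).toNat = L.toNat by omega]
  apply List.ext_getElem?
  intro k
  rw [pvAssign, pvAssign]
  by_cases hk : k < L.toNat
  · rw [if_pos hk, if_pos hk]
    have key : (decide ((pvPairF pred c ↑k).1 > (pvPairF pred c ↑k).2)) =
        (decide (PySem.List.pyGetD (pvScore pred c L) ↑k 0 > 0)) := by
      have hpair := pvPair (fun j => pvV pred j ↑k) ((List.range c.toNat).map Int.ofNat) (0, 0)
      have hsc : (pvScore pred c L)[k]? =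
          some (0 + (((List.range c.toNat).map Int.ofNat).map
            (fun j => pvSgn (pvV pred j ↑k))).sum) := by
        unfold pvScore
        rw [pvRange0 c, pvRange0 (max L 0), show (max L 0).toNat = L.toNat by omega,
          pvOuter (pvV pred) _ L.toNat _ k hk,
          List.getElem?_replicate_of_lt hk]
        rfl
      have hget : PySem.List.pyGetD (pvScore pred c L) ↑k 0 =
          0 + (((List.range c.toNat).map Int.ofNat).map (fun j => pvSgn (pvV pred j ↑k))).sum := by
        rw [PySem.List.pyGetD_of_nonneg _ _ (Int.natCast_nonneg k), List.getD_eq_getElem?_getD,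
          show ((k : Int)).toNat = k by omega, hsc]
        rfl
      rw [hget]
      unfold pvPairF
      rw [pvRange0 c]
      rw [decide_eq_decide]
      omega
    rw [key]
  · rw [if_neg hk, if_neg hk]

-- ===== VERDICT (by name: the statement is the Claim_ definition above) =====
theorem less_obey_more_spec : Claim_equal_less_obey_more := by
  intro pred clf_num pred_length res _ _
  unfold Spec_less_obey_more
  exact pvMain pred clf_num pred_length res
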